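-- pv_equiv track=rewrite | github.com/karenvo/xora | xora/pattern_analyzer.py | _classify_cap_pattern
-- ===== SOURCE A (Python) =====
-- def _classify_cap_pattern(word: str) -> str:
--     """Return the capitalization pattern of a single alpha word.
--
--     Patterns:
--       all_lower   — all letters lowercase:  password
--       all_upper   — all letters uppercase:  ACDC, RATT
--       first_only  — only first letter upper: Password, Motley
--       camel       — interior capital follows a lowercase (MotleyCrue, VanHalen)
--       alternating — evenly-spaced caps (pAsSwOrD)
--       mixed       — anything else
--     """
--     alpha = [c for c in word if c.isalpha()]
--     if not alpha:
--         return "all_lower"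
--
--     upper_count = sum(1 for c in alpha if c.isupper())
--     if upper_count == 0:
--         return "all_lower"
--     if upper_count == len(alpha):
--         return "all_upper"
--     if upper_count == 1 and alpha[0].isupper():
--         return "first_only"
--
--     # Alternating: upper positions are evenly spaced — check before camel
--     # so pAsSwOrD isn't misclassified as camel (which also has lc→uc transitions)
--     upper_pos = [i for i, c in enumerate(alpha) if c.isupper()]
--     if len(upper_pos) >= 3:
--         diffs = [upper_pos[i + 1] - upper_pos[i] for i in range(len(upper_pos) - 1)]
--         if len(set(diffs)) == 1:
--             return "alternating"
--
--     # CamelCase: at least one lowercase→uppercase transition inside the word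
--     has_camel = any(
--         alpha[i].islower() and alpha[i + 1].isupper()
--         for i in range(len(alpha) - 1)
--     )
--     if has_camel:
--         return "camel"
--
--     return "mixed"
-- ===== SOURCE B (Python) =====
-- def _classify_cap_pattern(word: str) -> str:
--     """Single forward pass over the alpha letters: maintain total/upper counts,
--     first-letter case, evenly-spaced-uppercase tracking and a camel flag."""
--     n = 0               # alpha letters seen
--     u = 0               # uppercase among them
--     first_upper = False
--     prev_up = None      # alpha-position of the previous uppercase letter
--     gap = None          # first gap between consecutive uppercase positions
--     even = True         # all gaps seen so far equal the first gap
--     camel = False       # some lowercase immediately followed by an uppercase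
--     prev_lower = False  # previous alpha letter was lowercase
--     for c in word:
--         if not c.isalpha():
--             continue
--         if c.isupper():
--             if n == 0:
--                 first_upper = True
--             if prev_lower:
--                 camel = True
--             if prev_up is not None:
--                 d = n - prev_up
--                 if gap is None:
--                     gap = d
--                 elif d != gap:
--                     even = False
--             prev_up = n
--             u += 1
--             prev_lower = False
--         else:
--             prev_lower = True
--         n += 1
--     if u == 0:
--         return "all_lower"
--     if u == n:
--         return "all_upper"
--     if u == 1 and first_upper:
--         return "first_only"
--     if u >= 3 and even:
--         return "alternating"
--     if camel:
--         return "camel"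
--     return "mixed"
-- ===== Notes on version B (the rewrite author's own statement) =====
-- stated objective: alternative
-- what changed: A builds the alpha list and then makes separate passes (count, enumerate/filter for upper positions, diff list + set, adjacent-pair scan); B classifies in one forward pass over the word, maintaining counts, the first-letter case, an evenly-spaced-gap flag and a lowercase-to-uppercase transition flag, then applies the same cascade.
import Mathlib
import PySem

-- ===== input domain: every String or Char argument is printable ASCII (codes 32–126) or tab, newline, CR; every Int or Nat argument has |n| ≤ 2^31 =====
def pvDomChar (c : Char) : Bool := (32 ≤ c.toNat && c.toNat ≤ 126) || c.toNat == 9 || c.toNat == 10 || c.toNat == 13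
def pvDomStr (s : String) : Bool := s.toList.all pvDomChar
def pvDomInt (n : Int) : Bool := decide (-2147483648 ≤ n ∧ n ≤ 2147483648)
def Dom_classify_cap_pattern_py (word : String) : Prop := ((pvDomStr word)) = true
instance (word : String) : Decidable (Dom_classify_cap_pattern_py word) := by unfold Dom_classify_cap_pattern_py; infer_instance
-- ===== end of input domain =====

-- B replaces A's several list comprehensions over the alpha letters by one forward pass
-- maintaining counts/flags (alternative decomposition, same classification cascade).


-- ===== PORT A =====
def classify_cap_pattern_py (word : String) : String :=
  let alpha := word.toList.filter PySem.Chars.isalpha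
  if alpha = [] then "all_lower"
  else
    let upper_count := alpha.countP (fun c => PySem.Chars.isupper c)
    if upper_count = 0 then "all_lower"
    else if upper_count = alpha.length then "all_upper"
    else if upper_count = 1 ∧ PySem.Chars.isupper (alpha.getD 0 'a') then "first_only"
    else
      let upper_pos : List Int :=
        ((PySem.List.enumerate alpha 0).filter (fun p => PySem.Chars.isupper p.2)).map (·.1)
      if 3 ≤ upper_pos.length ∧
          (let diffs := (List.range (upper_pos.length - 1)).map
              (fun i => upper_pos.getD (i + 1) 0 - upper_pos.getD i 0)
           (PySem.Set.ofList diffs).length = 1) then "alternating"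
      else
        let has_camel := (List.range (alpha.length - 1)).any
          (fun i => PySem.Chars.islower (alpha.getD i 'a') && PySem.Chars.isupper (alpha.getD (i + 1) 'a'))
        if has_camel then "camel" else "mixed"

-- ===== PORT B =====
structure CapSt where
  n : Int
  u : Int
  firstUpper : Bool
  prevUp : Option Int
  gap : Option Int
  even : Bool
  camel : Bool
  prevLower : Bool
deriving Repr, DecidableEq

def capStep (s : CapSt) (c : Char) : CapSt :=
  if !(PySem.Chars.isalpha c) then s
  else if PySem.Chars.isupper c then
    let firstUpper := if s.n = 0 then true else s.firstUpper
    let camel := if s.prevLower then true else s.camel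
    let ge : Option Int × Bool :=
      match s.prevUp with
      | none => (s.gap, s.even)
      | some p =>
        let d := s.n - p
        match s.gap with
        | none => (some d, s.even)
        | some g => (s.gap, if d ≠ g then false else s.even)
    { n := s.n + 1, u := s.u + 1, firstUpper := firstUpper, prevUp := some s.n,
      gap := ge.1, even := ge.2, camel := camel, prevLower := false }
  else
    { s with n := s.n + 1, prevLower := true }

def capInit : CapSt := ⟨0, 0, false, none, none, true, false, false⟩

def classify_cap_pattern_py_alt (word : String) : String :=
  let s := word.toList.foldl capStep capInit
  if s.u = 0 then "all_lower"
  else if s.u = s.n then "all_upper"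
  else if s.u = 1 ∧ s.firstUpper then "first_only"
  else if 3 ≤ s.u ∧ s.even then "alternating"
  else if s.camel then "camel"
  else "mixed"

-- ===== PRECONDITION & SPEC =====
def Spec_classify_cap_pattern_py (word : String) (out : String) : Prop := out = classify_cap_pattern_py_alt word
instance (word : String) (out : String) : Decidable (Spec_classify_cap_pattern_py word out) := by unfold Spec_classify_cap_pattern_py; infer_instance

-- ===== CLAIM (what is proved, stated in full; the proofs are below) =====
def Claim_equal_classify_cap_pattern_py : Prop := ∀ (word : String), Dom_classify_cap_pattern_py word → Spec_classify_cap_pattern_py word (classify_cap_pattern_py word)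

-- ===== LEMMAS AND PROOFS =====

-- abbreviations for the proofs
def isU (c : Char) : Bool := PySem.Chars.isupper c
def isA (c : Char) : Bool := PySem.Chars.isalpha c

-- positions (starting at s) of the uppercase letters of a list
def upPosI : List Char → Int → List Int
  | [], _ => []
  | c :: t, s => (if isU c then [s] else []) ++ upPosI t (s + 1)

def gapOf : List Int → Option Int
  | a :: b :: _ => some (b - a)
  | _ => none

def allEq (d : Int) : Int → List Int → Bool
  | _, [] => true
  | p, q :: t => (q - p == d) && allEq d q t

def evenOf : List Int → Bool
  | a :: b :: t => allEq (b - a) b t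
  | _ => true

def camelOf : List Char → Bool
  | a :: b :: t => (PySem.Chars.islower a && isU b) || camelOf (b :: t)
  | _ => false

def diffsOf : List Int → List Int
  | a :: b :: t => (b - a) :: diffsOf (b :: t)
  | _ => []

def specSt (al : List Char) : CapSt :=
  { n := (al.length : Int)
  , u := (al.countP (fun c => isU c) : Int)
  , firstUpper := (al.head?.map isU).getD false
  , prevUp := (upPosI al 0).getLast?
  , gap := gapOf (upPosI al 0)
  , even := evenOf (upPosI al 0)
  , camel := camelOf al
  , prevLower := (al.getLast?.map PySem.Chars.islower).getD false }

theorem lower_eq_not_upper (c : Char) (h : PySem.Chars.isalpha c = true) :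
    PySem.Chars.islower c = !(PySem.Chars.isupper c) := by
  simp only [PySem.Chars.isalpha, PySem.Chars.isupper, PySem.Chars.islower, Bool.or_eq_true,
    Bool.and_eq_true, decide_eq_true_eq, Char.le_def, UInt32.le_iff_toNat_le] at *
  rcases h with ⟨h1, h2⟩ | ⟨h1, h2⟩ <;> simp_all <;> omega

theorem foldl_capStep_filter (l : List Char) (s : CapSt) :
    l.foldl capStep s = (l.filter PySem.Chars.isalpha).foldl capStep s := by
  induction l generalizing s with
  | nil => rfl
  | cons c t ih =>
    by_cases h : isA c = true
    · have h' : PySem.Chars.isalpha c = true := by simpa [isA] using h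
      simp [h', List.foldl_cons, ih]
    · have hc : capStep s c = s := by
        simp [capStep, isA] at h ⊢
        simp [h]
      simp [isA] at h
      simp [h, List.foldl_cons, hc, ih]

theorem upPosI_append (al : List Char) (c : Char) (s : Int) :
    upPosI (al ++ [c]) s = upPosI al s ++ (if isU c then [s + al.length] else []) := by
  induction al generalizing s with
  | nil => simp [upPosI]
  | cons a t ih =>
    simp only [List.cons_append, upPosI, ih, List.append_assoc, List.length_cons]
    have : s + 1 + (t.length : Int) = s + ((t.length : Int) + 1) := by ring
    rw [this]
    norm_cast

theorem allEq_append (d : Int) (p : Int) (t : List Int) (j : Int) :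
    allEq d p (t ++ [j]) = (allEq d p t && (j - ((p :: t).getLast?.getD 0) == d)) := by
  induction t generalizing p with
  | nil => simp [allEq]
  | cons q t ih =>
    simp only [List.cons_append, allEq, ih, List.getLast?_cons_cons]
    simp [Bool.and_assoc]

theorem camelOf_append (al : List Char) (c : Char) :
    camelOf (al ++ [c])
      = (camelOf al || ((al.getLast?.map (fun b => PySem.Chars.islower b && isU c)).getD false)) := by
  induction al with
  | nil => simp [camelOf]
  | cons a t ih =>
    cases t with
    | nil => simp [camelOf]
    | cons b t' =>
      simp only [List.cons_append, camelOf] at *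
      rw [ih]
      simp [Bool.or_assoc]

theorem upPosI_length (al : List Char) (s : Int) :
    (upPosI al s).length = al.countP (fun c => isU c) := by
  induction al generalizing s with
  | nil => simp [upPosI]
  | cons a t ih =>
    by_cases h : isU a = true <;> simp [upPosI, h, ih, List.countP_cons]

theorem main_inv (al : List Char) (hal : ∀ c ∈ al, isA c = true) :
    al.foldl capStep capInit = specSt al := by
  induction al using List.reverseRecOn with
  | nil => rfl
  | append_singleton al c ih =>
    have hal' : ∀ x ∈ al, isA x = true := fun x hx => hal x (by simp [hx])
    have hc : isA c = true := hal c (by simp)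
    rw [List.foldl_append, List.foldl_cons, List.foldl_nil, ih hal']
    by_cases hu : isU c = true
    · have hlow : PySem.Chars.islower c = false := by
        rw [lower_eq_not_upper c (by simpa [isA] using hc)]
        simp [isU] at hu; simp [hu]
      simp only [capStep, specSt, isA, isU] at *
      simp only [hc, Bool.not_true, Bool.false_eq_true, if_false, hu, if_true]
      simp only [CapSt.mk.injEq]
      refine ⟨by simp <;> omega,
        by simp [List.countP_append, List.countP_cons, hu] <;> omega, ?_, ?_, ?_, ?_, ?_,
        by simp [List.getLast?_concat, hlow]⟩
      · cases al with
        | nil => simp [isU, hu] <;> omega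
        | cons a t =>
          simp
          intro h
          exfalso; omega
      · simp [upPosI_append, isU, hu]
      · rcases hU : upPosI al 0 with _ | ⟨a, _ | ⟨b, t⟩⟩
        · simp [upPosI_append, isU, hu, hU, gapOf]
        · simp [upPosI_append, isU, hu, hU, gapOf]
        · cases hgl : (a :: b :: t).getLast? <;>
            simp [upPosI_append, isU, hu, hU, gapOf, hgl]
      · rcases hU : upPosI al 0 with _ | ⟨a, _ | ⟨b, t⟩⟩
        · simp [upPosI_append, isU, hu, hU, evenOf]
        · simp [upPosI_append, isU, hu, hU, gapOf, evenOf, allEq]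
        · induction t using List.reverseRecOn with
          | nil =>
            simp only [upPosI_append, isU, hu, if_true, hU, List.nil_append,
              List.getLast?_cons_cons, List.getLast?_singleton, gapOf, evenOf, allEq, zero_add]
            by_cases hd : (al.length : Int) - b = b - a <;> simp [hd, allEq]
          | append_singleton t0 L _ =>
            have hgl : (a :: b :: (t0 ++ [L])).getLast? = some L := by
              rw [← List.cons_append, ← List.cons_append, List.getLast?_concat]
            have hgl2 : (b :: (t0 ++ [L])).getLast? = some L := by
              rw [← List.cons_append, List.getLast?_concat]
            simp only [upPosI_append, isU, hu, if_true, hU, zero_add, List.nil_append,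
              List.cons_append]
            simp only [hgl, gapOf, evenOf]
            conv_rhs => rw [allEq_append]
            rw [hgl2]
            by_cases hd : (al.length : Int) - L = b - a <;> simp [hd]
      · cases hL : al.getLast? with
        | none => simp [camelOf_append, hL]
        | some b =>
          by_cases hb : PySem.Chars.islower b = true <;>
            simp [camelOf_append, hL, hb, isU, hu, Bool.or_comm]
    · have hlow : PySem.Chars.islower c = true := by
        have := hc; simp [isA, PySem.Chars.isalpha] at this
        simp [isU] at hu
        rcases this with h | h
        · exact absurd h (by simp [hu])
        · exact h
      simp only [isU] at hu
      simp only [capStep, specSt, isA, isU] at *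
      simp only [hc, Bool.not_true, Bool.false_eq_true, if_false, hu]
      simp only [CapSt.mk.injEq]
      refine ⟨by simp <;> omega,
        by simp [List.countP_append, List.countP_cons, hu], ?_,
        by simp [upPosI_append, isU, hu], by simp [upPosI_append, isU, hu],
        by simp [upPosI_append, isU, hu], ?_,
        by simp [List.getLast?_concat, hlow]⟩
      · cases al with
        | nil => simp [isU, hu] <;> omega
        | cons a t => simp
      · cases hL : al.getLast? <;> simp [camelOf_append, hL, isU, hu]

-- bridges from A's computations to the spec quantities
theorem upper_pos_eq (al : List Char) (s : Int) :
    ((PySem.List.enumerate al s).filter (fun p => PySem.Chars.isupper p.2)).map (·.1)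
      = upPosI al s := by
  induction al generalizing s with
  | nil => simp [upPosI, PySem.List.enumerate_nil]
  | cons a t ih =>
    by_cases h : PySem.Chars.isupper a = true <;>
      simp [PySem.List.enumerate_cons, List.filter_cons, upPosI, h, ih, isU]

theorem diffs_eq (U : List Int) :
    (List.range (U.length - 1)).map (fun i => U.getD (i + 1) 0 - U.getD i 0) = diffsOf U := by
  induction U with
  | nil => simp [diffsOf]
  | cons a U ih =>
    cases U with
    | nil => simp [diffsOf]
    | cons b t =>
      have hr : List.range ((a :: b :: t).length - 1) = 0 :: (List.range ((b :: t).length - 1)).map (· + 1) := by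
        simp [List.range_succ_eq_map]
      rw [hr]
      simp only [List.map_cons, List.map_map, diffsOf]
      refine congrArg₂ _ (by simp) ?_
      rw [← ih]
      simp [Function.comp]

theorem allEq_eq_all (d p : Int) (t : List Int) :
    allEq d p t = (diffsOf (p :: t)).all (· == d) := by
  induction t generalizing p with
  | nil => simp [allEq, diffsOf]
  | cons q t ih => simp [allEq, diffsOf, ih]

theorem set_len_one (d : Int) (ds : List Int) :
    ((PySem.Set.ofList (d :: ds)).length = 1) ↔ (∀ x ∈ ds, x = d) := by
  constructor
  · intro h x hx
    obtain ⟨e, he⟩ : ∃ e, PySem.Set.ofList (d :: ds) = [e] := by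
      cases hS : PySem.Set.ofList (d :: ds) with
      | nil => rw [hS] at h; simp at h
      | cons y t => rw [hS] at h; simp at h; exact ⟨y, by simp [h]⟩
    have hd : d ∈ PySem.Set.ofList (d :: ds) := by
      rw [PySem.Set.mem_ofList]; simp
    have hxm : x ∈ PySem.Set.ofList (d :: ds) := by
      rw [PySem.Set.mem_ofList]; simp [hx]
    rw [he] at hd hxm
    simp at hd hxm
    rw [hxm, hd]
  · intro h
    have hmem : ∀ x, x ∈ PySem.Set.ofList (d :: ds) ↔ x = d := by
      intro x
      rw [PySem.Set.mem_ofList]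
      constructor
      · intro hx
        rcases List.mem_cons.1 hx with rfl | hx'
        · rfl
        · exact h _ hx'
      · rintro rfl; simp
    have hnd := PySem.Set.nodup_ofList (d :: ds)
    cases hS : PySem.Set.ofList (d :: ds) with
    | nil => exact absurd ((hmem d).2 rfl) (by simp [hS])
    | cons y t =>
      cases t with
      | nil => simp
      | cons z t' =>
        exfalso
        have hy : y = d := (hmem y).1 (by simp [hS])
        have hz : z = d := (hmem z).1 (by simp [hS])
        rw [hS] at hnd
        simp [List.nodup_cons] at hnd
        exact hnd.1.1 (by rw [hy, hz])

theorem camel_range_eq (al : List Char) :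
    ((List.range (al.length - 1)).any
      (fun i => PySem.Chars.islower (al.getD i 'a') && PySem.Chars.isupper (al.getD (i + 1) 'a')))
      = camelOf al := by
  induction al with
  | nil => simp [camelOf]
  | cons a t ih =>
    cases t with
    | nil => simp [camelOf]
    | cons b t' =>
      have hr : List.range ((a :: b :: t').length - 1) = 0 :: (List.range ((b :: t').length - 1)).map (· + 1) := by
        simp [List.range_succ_eq_map]
      rw [hr]
      simp only [List.any_cons, List.any_map, camelOf]
      rw [← ih]
      simp [Function.comp_def, List.getElem?_cons_succ, isU]

-- ===== VERDICT (by name: the statement is the Claim_ definition above) =====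
theorem all_diffs_iff (U : List Int) (hU : 2 ≤ U.length) :
    ((PySem.Set.ofList (diffsOf U)).length = 1) ↔ evenOf U = true := by
  rcases U with _ | ⟨u1, _ | ⟨u2, t⟩⟩
  · simp at hU
  · simp at hU
  · rw [show diffsOf (u1 :: u2 :: t) = (u2 - u1) :: diffsOf (u2 :: t) from rfl,
      set_len_one, show evenOf (u1 :: u2 :: t) = allEq (u2 - u1) u2 t from rfl,
      allEq_eq_all]
    simp [List.all_eq_true]

theorem classify_cap_pattern_py_spec : Claim_equal_classify_cap_pattern_py := by
  intro word _
  unfold Spec_classify_cap_pattern_py classify_cap_pattern_py classify_cap_pattern_py_alt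
  have hmem : ∀ c ∈ word.toList.filter PySem.Chars.isalpha, isA c = true := fun c hcm => by
    simpa [isA] using (List.mem_filter.1 hcm).2
  rw [foldl_capStep_filter, main_inv _ hmem]
  rcases hA : word.toList.filter PySem.Chars.isalpha with _ | ⟨a0, t0⟩
  · simp [specSt]
  · rw [if_neg (by simp)]
    simp only [specSt, isU, List.getD_cons_zero, List.length_cons, List.head?_cons,
      Option.map_some, Option.getD_some]
    have hlen : (upPosI (a0 :: t0) 0).length = (a0 :: t0).countP (fun c => PySem.Chars.isupper c) := by
      simpa [isU] using upPosI_length (a0 :: t0) 0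
    rw [upper_pos_eq, diffs_eq, hlen]
    simp only [← camel_range_eq]
    simp only [List.length_cons, Nat.add_sub_cancel]
    set k := (a0 :: t0).countP (fun c => PySem.Chars.isupper c) with hk
    by_cases h0 : k = 0
    · simp [isU, h0] <;> omega
    · have h0' : ¬ (k : Int) = 0 := by
        exact_mod_cast h0
      by_cases h1 : k = t0.length + 1
      · have h1' : (k : Int) = (t0.length : Int) + 1 := by
          exact_mod_cast h1
        simp [isU, h0, h0', h1, h1'] <;> omega
      · have h1' : ¬ (k : Int) = (t0.length : Int) + 1 := by
          exact_mod_cast h1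
        by_cases h2 : k = 1 ∧ PySem.Chars.isupper a0 = true
        · simp [isU, h0, h0', h1, h1', h2] <;> omega
        · by_cases h3 : 3 ≤ k
          · have h3' : (3 : Int) ≤ (k : Int) := by
              exact_mod_cast h3
            by_cases h4 : (PySem.Set.ofList (diffsOf (upPosI (a0 :: t0) 0))).length = 1
            · have he : evenOf (upPosI (a0 :: t0) 0) = true :=
                (all_diffs_iff _ (by omega)).1 h4
              simp [isU, h0, h0', h1, h1', h2, h3, h3', h4, he]
            · have he : ¬ evenOf (upPosI (a0 :: t0) 0) = true := fun h =>
                h4 ((all_diffs_iff _ (by omega)).2 h)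
              simp [isU, h0, h0', h1, h1', h2, h3, h4, he]
          · have h3' : ¬ (3 : Int) ≤ (k : Int) := by
              exact_mod_cast h3
            simp [isU, h0, h0', h1, h1', h2, h3, h3']
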